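-- pv_equiv track=rewrite | github.com/tveijola/internet-project | src/client.py | add_parity
-- ===== SOURCE A (Python) =====
-- def get_parity(n):
--     while n > 1:
--         n = (n >> 1) ^ (n & 1)
--     return n
--
-- def add_parity(msg):
--     char_list = []
--     for c in msg:
--         c = ord(c)
--         c <<= 1
--         c += get_parity(c)
--         char_list.append(chr(c))
--     return "".join(char_list)
-- ===== SOURCE B (Python) =====
-- def add_parity(msg):
--     return "".join(
--         chr((ord(ch) << 1) | (bin(ord(ch)).count('1') & 1))
--         for ch in msg
--     )
-- ===== Notes on version B (the rewrite author's own statement) =====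
-- stated objective: idiomatic
-- what changed: Replaces the iterative bit-folding helper get_parity with a direct popcount-based parity (counting set bits of the code and taking the low bit, valid since shifting left preserves bit parity) ORed into the shifted code, and builds the result with a generator joined via str.join instead of an accumulator list.
import Mathlib
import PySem

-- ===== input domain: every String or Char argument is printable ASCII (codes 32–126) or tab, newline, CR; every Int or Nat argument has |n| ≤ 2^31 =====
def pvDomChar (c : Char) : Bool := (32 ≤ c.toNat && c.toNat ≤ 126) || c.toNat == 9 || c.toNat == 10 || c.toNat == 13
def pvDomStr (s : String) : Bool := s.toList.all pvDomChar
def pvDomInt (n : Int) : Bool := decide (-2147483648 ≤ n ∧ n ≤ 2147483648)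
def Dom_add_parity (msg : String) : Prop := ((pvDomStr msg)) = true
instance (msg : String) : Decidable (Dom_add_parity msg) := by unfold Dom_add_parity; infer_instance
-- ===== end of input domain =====

-- B replaces the bit-folding helper with a set-bit-count parity ORed into the shifted code,
-- built by a joined generator instead of an accumulator list (idiomatic; same cost).

-- ===== PORT A =====
-- termination measure for get_parity's while loop
theorem pvStepLt (n : Nat) (h : 1 < n) : (n >>> 1) ^^^ (n &&& 1) < n := by
  have h1 : n >>> 1 = n / 2 := Nat.shiftRight_one n
  have h2 : n &&& 1 = n % 2 := Nat.and_one_is_mod n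
  rcases Nat.even_or_odd (n / 2) with he | ho
  · rcases Nat.even_or_odd n with hne | hno
    · have : n % 2 = 0 := Nat.even_iff.mp hne
      simp [h1, h2, this]; omega
    · have hm : n % 2 = 1 := Nat.odd_iff.mp hno
      rw [h1, h2, hm, Nat.xor_one_of_even he]; omega
  · rcases Nat.even_or_odd n with hne | hno
    · have : n % 2 = 0 := Nat.even_iff.mp hne
      simp [h1, h2, this]; omega
    · have hm : n % 2 = 1 := Nat.odd_iff.mp hno
      rw [h1, h2, hm, Nat.xor_one_of_odd ho]; omega

-- while n > 1: n = (n >> 1) ^ (n & 1)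
def get_parity (n : Nat) : Nat :=
  if h : 1 < n then get_parity ((n >>> 1) ^^^ (n &&& 1)) else n
  termination_by n
  decreasing_by exact pvStepLt n h

-- for c in msg: c = ord(c); c <<= 1; c += get_parity(c); char_list.append(chr(c))
def addParityGo (charList : List Char) : List Char → List Char
  | [] => charList
  | c :: rest =>
      let n := c.toNat <<< 1
      addParityGo (charList ++ [Char.ofNat (n + get_parity n)]) rest

def add_parity (msg : String) : String :=
  String.mk (addParityGo [] msg.toList)

-- ===== PORT B =====
-- bin(c).count('1'): number of set bits of c
def popcount (n : Nat) : Nat :=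
  if n = 0 then 0 else n % 2 + popcount (n / 2)
  termination_by n
  decreasing_by omega

def add_parity_alt (msg : String) : String :=
  String.mk (msg.toList.map (fun ch =>
    Char.ofNat ((ch.toNat <<< 1) ||| (popcount ch.toNat &&& 1))))

-- ===== PRECONDITION & SPEC =====
def Spec_add_parity (msg : String) (out : String) : Prop := out = add_parity_alt msg
instance (msg : String) (out : String) : Decidable (Spec_add_parity msg out) := by unfold Spec_add_parity; infer_instance

-- ===== CLAIM (what is proved, stated in full; the proofs are below) =====
def Claim_equal_add_parity : Prop := ∀ (msg : String), Dom_add_parity msg → Spec_add_parity msg (add_parity msg)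

-- ===== LEMMAS AND PROOFS =====

-- per-character agreement on the domain's char codes
set_option maxHeartbeats 4000000 in
theorem pvCharStep (n : Nat) (h : n ≤ 126) :
    (n <<< 1) + get_parity (n <<< 1) = (n <<< 1) ||| (popcount n &&& 1) := by
  interval_cases n <;> simp [get_parity, popcount]

theorem pvGoAppend (l : List Char) (acc : List Char)
    (hd : ∀ c ∈ l, pvDomChar c = true) :
    addParityGo acc l =
      acc ++ l.map (fun ch => Char.ofNat ((ch.toNat <<< 1) ||| (popcount ch.toNat &&& 1))) := by
  induction l generalizing acc with
  | nil => simp [addParityGo]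
  | cons c rest ih =>
      have hc : c.toNat ≤ 126 := by
        have := hd c (List.mem_cons_self ..)
        simp [pvDomChar] at this
        omega
      simp only [addParityGo, List.map_cons]
      rw [ih _ (fun x hx => hd x (List.mem_cons_of_mem _ hx))]
      rw [pvCharStep c.toNat hc]
      simp

-- ===== VERDICT (by name: the statement is the Claim_ definition above) =====
theorem add_parity_spec : Claim_equal_add_parity := by
  intro msg hdom
  unfold Spec_add_parity add_parity add_parity_alt
  rw [pvGoAppend msg.toList [] (by simpa [Dom_add_parity, pvDomStr, List.all_eq_true] using hdom)]
  simp
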